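-- pv_equiv track=rewrite | github.com/bzzbbzbz/telegram-casino-bot | bot/dice_check.py | get_combo_parts
-- ===== SOURCE A (Python) =====
-- from typing import List, Tuple
--
-- def get_combo_parts(dice_value: int) -> List[str]:
--     """
--     Returns exact icons from dice (bar, grapes, lemon, seven).
--     Do not edit these values, since they are subject to be translated
--     by outer code.
--     :param dice_value: dice value (1-64)
--     :return: list of icons' texts
--     """
--
--     # Alternative way (credits to t.me/svinerus):
--     #   return [casino[(dice_value - 1) // i % 4]for i in (1, 4, 16)]
--
--     # Do not edit these values; they are actually translation keys
--     #           0       1         2        3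
--     values = ["bar", "grapes", "lemon", "seven"]
--
--     dice_value -= 1
--     result = []
--     for _ in range(3):
--         result.append(values[dice_value % 4])
--         dice_value //= 4
--     return result
-- ===== SOURCE B (Python) =====
-- def get_combo_parts(dice_value: int):
--     """Same icons via a precomputed table of all 64 slot combinations
--     (Cartesian product in dice order), indexed by (dice_value - 1) mod 64.
--     A's digit loop reads only the three base-4 digits of (dice_value - 1),
--     i.e. its residue mod 64, so this table lookup agrees everywhere."""
--     values = ["bar", "grapes", "lemon", "seven"]
--     table = [[a, b, c] for c in values for b in values for a in values]
--     return table[(dice_value - 1) % 64]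
-- ===== Notes on version B (the rewrite author's own statement) =====
-- stated objective: alternative
-- what changed: Replaces the per-digit extraction loop with a precomputed Cartesian-product table of all 64 combinations, returning the row at index (dice_value-1) mod 64; no digit arithmetic or accumulator mutation.
import Mathlib
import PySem

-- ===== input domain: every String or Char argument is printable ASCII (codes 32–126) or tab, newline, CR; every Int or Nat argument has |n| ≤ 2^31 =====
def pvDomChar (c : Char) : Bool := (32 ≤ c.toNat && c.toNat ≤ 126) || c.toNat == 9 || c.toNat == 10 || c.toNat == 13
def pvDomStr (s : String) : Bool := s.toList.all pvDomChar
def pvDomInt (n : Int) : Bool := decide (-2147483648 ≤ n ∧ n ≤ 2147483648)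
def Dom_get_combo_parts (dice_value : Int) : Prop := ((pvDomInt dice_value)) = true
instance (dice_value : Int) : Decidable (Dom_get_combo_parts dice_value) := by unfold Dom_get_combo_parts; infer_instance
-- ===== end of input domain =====

-- B replaces A's digit-extraction loop by a precomputed table of all 64 slot
-- combinations indexed by (dice_value - 1) mod 64; same value for every int.

-- ===== PORT A =====
-- loop state: (current dice_value, result list); values[dice_value % 4] never
-- misses since mod 4 is in 0..3, so the Option from pyGet? is defaulted to "".
def get_combo_parts (dice_value : Int) : List String :=
  let values : List String := ["bar", "grapes", "lemon", "seven"]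
  let st := (PySem.List.pyRange 0 3 1).foldl
    (fun (st : Int × List String) _ =>
      (PySem.Int.floordiv st.1 4,
       st.2 ++ [(PySem.List.pyGet? values (PySem.Int.mod st.1 4)).getD ""]))
    (dice_value - 1, [])
  st.2

-- ===== PORT B =====
-- table built exactly as Source B's comprehension: outer c, middle b, inner a, row [a,b,c];
-- the index (dice_value - 1) mod 64 is in 0..63, so pyGet? never misses (defaulted to []).
def get_combo_parts_alt (dice_value : Int) : List String :=
  let values : List String := ["bar", "grapes", "lemon", "seven"]
  let table : List (List String) :=
    values.flatMap (fun c => values.flatMap (fun b => values.map (fun a => [a, b, c])))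
  (PySem.List.pyGet? table (PySem.Int.mod (dice_value - 1) 64)).getD []

-- ===== PRECONDITION & SPEC =====
def Spec_get_combo_parts (dice_value : Int) (out : List String) : Prop := out = get_combo_parts_alt dice_value
instance (dice_value : Int) (out : List String) : Decidable (Spec_get_combo_parts dice_value out) := by unfold Spec_get_combo_parts; infer_instance

-- ===== CLAIM (what is proved, stated in full; the proofs are below) =====
def Claim_equal_get_combo_parts : Prop := ∀ (dice_value : Int), Dom_get_combo_parts dice_value → Spec_get_combo_parts dice_value (get_combo_parts dice_value)

-- ===== LEMMAS AND PROOFS =====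
set_option maxRecDepth 4000 in
theorem pv_periodic (m : Int) :
    get_combo_parts (m + 1) = get_combo_parts (m % 64 + 1) := by
  simp only [get_combo_parts, PySem.List.pyRange, add_sub_cancel_right]
  norm_num [show List.range (Int.toNat 3) = [0, 1, 2] from rfl, List.foldl]
  rw [show m / 4 % 4 = m % 64 / 4 % 4 from by omega,
      show m / 4 / 4 % 4 = m % 64 / 4 / 4 % 4 from by omega]
  exact ⟨rfl, rfl⟩

theorem pv_mod_mod (m : Int) :
    PySem.Int.mod (m + 1 - 1) 64 = PySem.Int.mod (m % 64 + 1 - 1) 64 := by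
  rw [PySem.Int.mod_eq_emod_of_pos, PySem.Int.mod_eq_emod_of_pos] <;> omega

set_option maxRecDepth 4000 in
theorem pv_key (m : Int) :
    get_combo_parts (m + 1) = get_combo_parts_alt (m + 1) := by
  rw [pv_periodic m, show get_combo_parts_alt (m + 1) = get_combo_parts_alt (m % 64 + 1) by
    simp only [get_combo_parts_alt]; rw [pv_mod_mod]]
  have hk0 : 0 ≤ m % 64 := by omega
  have hk1 : m % 64 < 64 := by omega
  generalize m % 64 = k at hk0 hk1 ⊢
  interval_cases k <;> rfl

-- ===== VERDICT (by name: the statement is the Claim_ definition above) =====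
theorem get_combo_parts_spec : Claim_equal_get_combo_parts := by
  intro d _
  show get_combo_parts d = get_combo_parts_alt d
  simpa using pv_key (d - 1)
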